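-- pv_equiv track=rewrite | github.com/posl/comment_recommendation | script/mod_gen/3_time/zh/141_B/0.py | check_easy
-- ===== SOURCE A (Python) =====
-- def check_easy(s):
--     for i in range(len(s)):
--         if i % 2 == 0:
--             if s[i] == 'L':
--                 continue
--             else:
--                 return False
--         else:
--             if s[i] in ('R', 'U', 'D'):
--                 continue
--             else:
--                 return False
--     return True
-- ===== SOURCE B (Python) =====
-- def check_easy(s):
--     return all(c == 'L' for c in s[::2]) and all(c in 'RUD' for c in s[1::2])
-- ===== Notes on version B (the rewrite author's own statement) =====
-- stated objective: simpler
-- what changed: Replaces the single index loop with an i % 2 branch by two strided slice passes over s[::2] and s[1::2], checking each slice against its required character set with all().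
import Mathlib
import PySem

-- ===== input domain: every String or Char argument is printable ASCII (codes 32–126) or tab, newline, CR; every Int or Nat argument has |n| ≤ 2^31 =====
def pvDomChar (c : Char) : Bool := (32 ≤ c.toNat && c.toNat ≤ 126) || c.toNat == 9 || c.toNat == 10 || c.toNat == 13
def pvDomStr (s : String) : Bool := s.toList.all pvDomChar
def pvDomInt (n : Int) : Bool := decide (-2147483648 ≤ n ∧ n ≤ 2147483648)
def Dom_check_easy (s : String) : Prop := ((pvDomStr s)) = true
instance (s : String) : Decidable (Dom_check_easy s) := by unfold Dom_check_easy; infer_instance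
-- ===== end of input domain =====

-- B replaces A's single parity-branching index loop by two strided passes (even slice all 'L', odd slice all in 'RUD'); simpler decomposition, same O(n) cost.


-- ===== PORT A =====
-- A's loop 'for i in range(len(s))' with early returns, as structural recursion
-- over the characters carrying the index i; branches in A's order.
def checkLoopA : List Char → Nat → Bool
  | [], _ => true
  | c :: rest, i =>
    if i % 2 = 0 then
      if c = 'L' then checkLoopA rest (i + 1) else false
    else
      if c = 'R' ∨ c = 'U' ∨ c = 'D' then checkLoopA rest (i + 1) else false

def check_easy (s : String) : Bool := checkLoopA s.toList 0

-- ===== PORT B =====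
-- hand port of the step-2 slice xs[::2] (exact: takes every other element from the head)
def everyOther : List Char → List Char
  | [] => []
  | [c] => [c]
  | c :: _ :: rest => c :: everyOther rest

-- s[1::2] is everyOther of the tail
def check_easy_alt (s : String) : Bool :=
  (everyOther s.toList).all (fun c => c = 'L') &&
  (everyOther s.toList.tail).all (fun c => c = 'R' ∨ c = 'U' ∨ c = 'D')

-- ===== PRECONDITION & SPEC =====
def Spec_check_easy (s : String) (out : Bool) : Prop := out = check_easy_alt s
instance (s : String) (out : Bool) : Decidable (Spec_check_easy s out) := by unfold Spec_check_easy; infer_instance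

-- ===== CLAIM (what is proved, stated in full; the proofs are below) =====
def Claim_equal_check_easy : Prop := ∀ (s : String), Dom_check_easy s → Spec_check_easy s (check_easy s)

-- ===== LEMMAS AND PROOFS =====
theorem everyOther_cons (d : Char) (rest : List Char) :
    everyOther (d :: rest) = d :: everyOther rest.tail := by
  cases rest <;> simp [everyOther]

theorem checkLoopA_eq (l : List Char) (i : Nat) (h : i % 2 = 0) :
    checkLoopA l i =
      ((everyOther l).all (fun c => c = 'L') &&
       (everyOther l.tail).all (fun c => c = 'R' ∨ c = 'U' ∨ c = 'D')) := by
  match l with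
  | [] => simp [checkLoopA, everyOther]
  | [c] => simp [checkLoopA, everyOther, h]
  | c :: d :: rest =>
    have ih := checkLoopA_eq rest (i + 1 + 1) (by omega)
    simp only [checkLoopA, everyOther, everyOther_cons, List.tail_cons, List.all_cons]
    rw [if_pos h, if_neg (show ¬ (i + 1) % 2 = 0 by omega)]
    by_cases hc : c = 'L' <;> by_cases hd : d = 'R' ∨ d = 'U' ∨ d = 'D' <;>
      simp [hc, hd, ih, everyOther_cons, Bool.and_comm]
termination_by l.length

-- ===== VERDICT (by name: the statement is the Claim_ definition above) =====
theorem check_easy_spec : Claim_equal_check_easy := by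
  intro s _
  unfold Spec_check_easy check_easy check_easy_alt
  exact checkLoopA_eq s.toList 0 rfl
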